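-- pv_equiv track=rewrite | github.com/karasungur/visagen | visagen/models/discriminators/patch_discriminator.py | _calc_receptive_field
-- ===== SOURCE A (Python) =====
-- def _calc_receptive_field(layers: list[tuple[int, int]]) -> int:
--     """
--     Calculate receptive field size for given layer configuration.
--
--     Same result as https://fomoro.com/research/article/receptive-field-calculator
--
--     Args:
--         layers: List of (kernel_size, stride) tuples.
--
--     Returns:
--         Receptive field size in pixels.
--     """
--     rf = 0
--     ts = 1
--     for i, (k, s) in enumerate(layers):
--         if i == 0:
--             rf = k
--         else:
--             rf += (k - 1) * ts
--         ts *= s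
--     return rf
-- ===== SOURCE B (Python) =====
-- def _calc_receptive_field(layers: list[tuple[int, int]]) -> int:
--     if not layers:
--         return 0
--     r = 1
--     for k, s in reversed(layers):
--         r = (r - 1) * s + k
--     return r
-- ===== Notes on version B (the rewrite author's own statement) =====
-- stated objective: alternative
-- what changed: B replaces A's forward pass maintaining two running totals (receptive field and total stride) with the standard backward receptive-field recurrence r = (r-1)*s + k over the layers in reverse, keeping a single accumulator (empty list still returns 0).
import Mathlib
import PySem

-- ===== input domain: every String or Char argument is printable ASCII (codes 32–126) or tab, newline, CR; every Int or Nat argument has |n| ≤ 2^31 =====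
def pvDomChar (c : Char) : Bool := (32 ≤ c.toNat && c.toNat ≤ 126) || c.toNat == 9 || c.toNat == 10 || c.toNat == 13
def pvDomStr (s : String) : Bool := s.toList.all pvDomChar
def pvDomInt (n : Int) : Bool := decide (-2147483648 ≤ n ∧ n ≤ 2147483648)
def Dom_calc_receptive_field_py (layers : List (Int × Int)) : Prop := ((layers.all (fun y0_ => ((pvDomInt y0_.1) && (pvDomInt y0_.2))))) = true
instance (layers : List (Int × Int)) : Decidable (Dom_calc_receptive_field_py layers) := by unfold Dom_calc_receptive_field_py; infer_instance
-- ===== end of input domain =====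

-- B replaces A's forward two-accumulator pass with the backward recurrence r = (r-1)*s + k
-- over the layers in reverse (alternative decomposition; same O(n) cost).

-- ===== PORT A =====
-- for i, (k, s) in enumerate(layers): if i == 0: rf = k else: rf += (k-1)*ts; ts *= s
def calc_receptive_field_py (layers : List (Int × Int)) : Int :=
  ((PySem.List.enumerate layers 0).foldl
    (fun (st : Int × Int) p =>
      (if p.1 == 0 then p.2.1 else st.1 + (p.2.1 - 1) * st.2, st.2 * p.2.2))
    (0, 1)).1

-- ===== PORT B =====
-- if not layers: return 0; r = 1; for k, s in reversed(layers): r = (r-1)*s + k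
def calc_receptive_field_py_alt (layers : List (Int × Int)) : Int :=
  if layers = [] then 0
  else layers.reverse.foldl (fun r p => (r - 1) * p.2 + p.1) 1

-- ===== PRECONDITION & SPEC =====
def Spec_calc_receptive_field_py (layers : List (Int × Int)) (out : Int) : Prop := out = calc_receptive_field_py_alt layers
instance (layers : List (Int × Int)) (out : Int) : Decidable (Spec_calc_receptive_field_py layers out) := by unfold Spec_calc_receptive_field_py; infer_instance

-- ===== CLAIM (what is proved, stated in full; the proofs are below) =====
def Claim_equal_calc_receptive_field_py : Prop := ∀ (layers : List (Int × Int)), Dom_calc_receptive_field_py layers → Spec_calc_receptive_field_py layers (calc_receptive_field_py layers)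

-- ===== LEMMAS AND PROOFS =====

-- A's loop over the tail (indices ≥ 1, so the i == 0 branch never fires) from state (rf, ts)
-- lands on rf + ts * (R - 1), where R is B's backward recurrence over that tail.
theorem pv_tail_loop (rest : List (Int × Int)) :
    ∀ (n : Int) (rf ts : Int), 1 ≤ n →
      ((PySem.List.enumerate rest n).foldl
        (fun (st : Int × Int) p =>
          (if p.1 == 0 then p.2.1 else st.1 + (p.2.1 - 1) * st.2, st.2 * p.2.2))
        (rf, ts)).1
      = rf + ts * (rest.foldr (fun p r => (r - 1) * p.2 + p.1) 1 - 1) := by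
  induction rest with
  | nil => intro n rf ts _; simp
  | cons hd tl ih =>
      intro n rf ts hn
      rw [PySem.List.enumerate_cons]
      simp only [List.foldl_cons, List.foldr_cons]
      have hne : (n == 0) = false := by simp; omega
      rw [hne]
      simp only [Bool.false_eq_true, if_false]
      rw [ih (n + 1) _ _ (by omega)]
      ring

theorem calc_receptive_field_py_eq (layers : List (Int × Int)) :
    calc_receptive_field_py layers = calc_receptive_field_py_alt layers := by
  cases layers with
  | nil => rfl
  | cons hd tl =>
      unfold calc_receptive_field_py calc_receptive_field_py_alt
      rw [if_neg (by simp)]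
      rw [List.foldl_reverse]
      rw [PySem.List.enumerate_cons]
      simp only [List.foldl_cons, List.foldr_cons]
      simp only [beq_self_eq_true, if_true, zero_add]
      rw [pv_tail_loop tl 1 hd.1 (1 * hd.2) (by omega)]
      ring

-- ===== VERDICT (by name: the statement is the Claim_ definition above) =====
theorem calc_receptive_field_py_spec : Claim_equal_calc_receptive_field_py := by
  intro layers _
  unfold Spec_calc_receptive_field_py
  exact calc_receptive_field_py_eq layers
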